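-- pv_equiv track=rewrite | github.com/ZhijianChan/linux-env | bin/command.py | _match_short_host
-- ===== SOURCE A (Python) =====
-- def _match_short_host(host):
--     for num in range(256):
--         if host == '{}'.format(num):
--             return '172.26.3.{}'.format(host)
--
--         if host in ['2.{}'.format(num), '3.{}'.format(num)]:
--             return '172.26.{}'.format(host)
--
--         if host in ['52.{}'.format(num), ]:
--             return '172.25.{}'.format(host)
--
--         if host in ['1.{}'.format(num), ]:
--             return '192.168.{}'.format(host)
--     return host
-- ===== SOURCE B (Python) =====
-- def _match_short_host(host):
--     if not isinstance(host, str):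
--         return host
--     parts = host.split('.')
--
--     def octet(s):
--         return s.isdigit() and 0 <= int(s) <= 255 and str(int(s)) == s
--
--     if len(parts) == 1:
--         return '172.26.3.' + host if octet(host) else host
--     if len(parts) == 2:
--         prefix, part = parts
--         if octet(part):
--             if prefix in ('2', '3'):
--                 return '172.26.' + host
--             if prefix == '52':
--                 return '172.25.' + host
--             if prefix == '1':
--                 return '192.168.' + host
--     return host
-- ===== Notes on version B (the rewrite author's own statement) =====
-- stated objective: simpler
-- what changed: A generates up to 5*256 candidate pattern strings per call and compares host against each; B splits host once at the dots, validates the last piece as a canonical decimal octet 0-255, and maps the prefix through a four-entry table.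
import Mathlib
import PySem

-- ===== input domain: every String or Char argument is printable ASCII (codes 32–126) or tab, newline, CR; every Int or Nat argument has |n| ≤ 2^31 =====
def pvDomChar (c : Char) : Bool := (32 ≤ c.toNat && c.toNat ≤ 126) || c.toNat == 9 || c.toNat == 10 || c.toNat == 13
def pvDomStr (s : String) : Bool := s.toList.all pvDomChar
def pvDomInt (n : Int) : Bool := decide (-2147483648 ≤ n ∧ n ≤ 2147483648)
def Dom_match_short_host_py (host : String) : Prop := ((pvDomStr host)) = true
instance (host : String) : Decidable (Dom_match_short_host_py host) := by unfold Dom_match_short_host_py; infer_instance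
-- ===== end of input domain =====

-- B replaces A's 256-iteration pattern-generation loop by a single split on '.' plus a
-- canonical-octet check and a prefix table (simpler, and cheaper by a constant factor).

-- ===== PORT A =====
-- the 'for num in range(256)' loop with its early returns, step for step
def matchLoopA (host : String) : List Int → String
  | [] => host
  | num :: rest =>
    if host == PySem.Int.toStr num then "172.26.3." ++ host
    else if host == "2." ++ PySem.Int.toStr num || host == "3." ++ PySem.Int.toStr num then
      "172.26." ++ host
    else if host == "52." ++ PySem.Int.toStr num then "172.25." ++ host
    else if host == "1." ++ PySem.Int.toStr num then "192.168." ++ host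
    else matchLoopA host rest

def match_short_host_py (host : String) : String :=
  matchLoopA host (PySem.List.pyRange 0 256 1)

-- ===== PORT B =====
-- octet(s) = s.isdigit() and 0 <= int(s) <= 255 and str(int(s)) == s
-- (int(s) is guarded by s.isdigit(), so the Python never raises; the 'none' arm is unreachable)
def pyOctet (s : String) : Bool :=
  PySem.Str.strIsdigit s &&
    (match PySem.Int.ofStr? s with
     | some n => decide (0 ≤ n) && decide (n ≤ 255) && (PySem.Int.toStr n == s)
     | none => false)

def match_short_host_py_alt (host : String) : String :=
  match PySem.Str.split? host "." with
  | none => host   -- unreachable: the separator "." is non-empty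
  | some parts =>
    match parts with
    | [p] => if pyOctet p then "172.26.3." ++ host else host
    | [pre, part] =>
      if pyOctet part then
        if pre == "2" || pre == "3" then "172.26." ++ host
        else if pre == "52" then "172.25." ++ host
        else if pre == "1" then "192.168." ++ host
        else host
      else host
    | _ => host

-- ===== PRECONDITION & SPEC =====
def Spec_match_short_host_py (host : String) (out : String) : Prop := out = match_short_host_py_alt host
instance (host : String) (out : String) : Decidable (Spec_match_short_host_py host out) := by unfold Spec_match_short_host_py; infer_instance

-- ===== CLAIM (what is proved, stated in full; the proofs are below) =====
def Claim_equal_match_short_host_py : Prop := ∀ (host : String), Dom_match_short_host_py host → Spec_match_short_host_py host (match_short_host_py host)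

-- ===== LEMMAS AND PROOFS =====

-- every num in range(256): its decimal string passes the octet test and contains no '.'
set_option maxRecDepth 40000 in
lemma range_facts :
    (PySem.List.pyRange 0 256 1).all
      (fun num => pyOctet (PySem.Int.toStr num) && !((PySem.Int.toStr num).toList.contains '.')) = true := by
  decide

lemma toStr_octet {m : Int} (h : m ∈ PySem.List.pyRange 0 256 1) :
    pyOctet (PySem.Int.toStr m) = true :=
  (by simpa using (List.all_eq_true.mp range_facts m h) : pyOctet (PySem.Int.toStr m) = true ∧ '.' ∉ (PySem.Int.toStr m).toList).1

lemma toStr_dotfree {m : Int} (h : m ∈ PySem.List.pyRange 0 256 1) :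
    '.' ∉ (PySem.Int.toStr m).toList :=
  (by simpa using (List.all_eq_true.mp range_facts m h) : pyOctet (PySem.Int.toStr m) = true ∧ '.' ∉ (PySem.Int.toStr m).toList).2

lemma toChars_dotfree {m : Int} (h : m ∈ PySem.List.pyRange 0 256 1) :
    '.' ∉ PySem.Int.toChars m := by
  have := toStr_dotfree h
  rwa [PySem.Int.toList_toStr] at this

lemma pyOctet_exists {s : String} (h : pyOctet s = true) :
    ∃ m : Int, m ∈ PySem.List.pyRange 0 256 1 ∧ s = PySem.Int.toStr m := by
  unfold pyOctet at h
  cases hof : PySem.Int.ofStr? s with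
  | none => rw [hof] at h; simp at h
  | some n =>
    rw [hof] at h
    simp only [Bool.and_eq_true, decide_eq_true_eq, beq_iff_eq] at h
    exact ⟨n, PySem.List.mem_pyRange_one.mpr ⟨h.2.1.1, by omega⟩, h.2.2.symm⟩

-- toList of the four dotted patterns
lemma toList_p2 (m : Int) : ("2." ++ PySem.Int.toStr m).toList = ['2'] ++ '.' :: PySem.Int.toChars m := by
  rw [String.toList_append, PySem.Int.toList_toStr]; rfl
lemma toList_p3 (m : Int) : ("3." ++ PySem.Int.toStr m).toList = ['3'] ++ '.' :: PySem.Int.toChars m := by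
  rw [String.toList_append, PySem.Int.toList_toStr]; rfl
lemma toList_p52 (m : Int) : ("52." ++ PySem.Int.toStr m).toList = ['5','2'] ++ '.' :: PySem.Int.toChars m := by
  rw [String.toList_append, PySem.Int.toList_toStr]; rfl
lemma toList_p1 (m : Int) : ("1." ++ PySem.Int.toStr m).toList = ['1'] ++ '.' :: PySem.Int.toChars m := by
  rw [String.toList_append, PySem.Int.toList_toStr]; rfl

lemma dot_in_p2 (m : Int) : '.' ∈ ("2." ++ PySem.Int.toStr m).toList := by rw [toList_p2]; simp
lemma dot_in_p3 (m : Int) : '.' ∈ ("3." ++ PySem.Int.toStr m).toList := by rw [toList_p3]; simp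
lemma dot_in_p52 (m : Int) : '.' ∈ ("52." ++ PySem.Int.toStr m).toList := by rw [toList_p52]; simp
lemma dot_in_p1 (m : Int) : '.' ∈ ("1." ++ PySem.Int.toStr m).toList := by rw [toList_p1]; simp

-- uniqueness of the first-dot decomposition
lemma uniq_dot : ∀ (a a' b b' : List Char), a ++ '.' :: b = a' ++ '.' :: b' →
    '.' ∉ a → '.' ∉ a' → a = a' ∧ b = b' := by
  intro a
  induction a with
  | nil =>
    intro a' b b' h ha ha'
    cases a' with
    | nil => simpa using h
    | cons c t =>
      simp only [List.nil_append, List.cons_append, List.cons.injEq] at h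
      exact absurd (h.1 ▸ List.mem_cons_self) ha'
  | cons c t ih =>
    intro a' b b' h ha ha'
    cases a' with
    | nil =>
      simp only [List.cons_append, List.nil_append, List.cons.injEq] at h
      exact absurd (h.1.symm ▸ List.mem_cons_self) ha
    | cons c' t' =>
      simp only [List.cons_append, List.cons.injEq] at h
      have := ih t' b b' h.2 (fun hm => ha (List.mem_cons_of_mem _ hm))
        (fun hm => ha' (List.mem_cons_of_mem _ hm))
      exact ⟨by rw [h.1, this.1], this.2⟩

lemma first_dot {cs : List Char} (h : '.' ∈ cs) :
    ∃ a b, cs = a ++ '.' :: b ∧ '.' ∉ a := by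
  induction cs with
  | nil => cases h
  | cons c t ih =>
    by_cases hc : c = '.'
    · exact ⟨[], t, by rw [hc]; rfl, by simp⟩
    · have ht : '.' ∈ t := by
        cases List.mem_cons.mp h with
        | inl h0 => exact absurd h0.symm hc
        | inr h0 => exact h0
      obtain ⟨a, b, hab, ha⟩ := ih ht
      refine ⟨c :: a, b, by rw [hab]; rfl, ?_⟩
      intro hm
      cases List.mem_cons.mp hm with
      | inl h0 => exact hc h0.symm
      | inr h0 => exact ha h0

-- if host.toList = a ++ '.'::b ('.'∉a) and host equals a dotted pattern, the pieces coincide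
lemma decomp_pat {host s : String} {a b pre : List Char} {m : Int}
    (hcs : host.toList = a ++ '.' :: b) (ha : '.' ∉ a) (hp : '.' ∉ pre)
    (hpat : s.toList = pre ++ '.' :: PySem.Int.toChars m) (he : host = s) :
    a = pre ∧ b = PySem.Int.toChars m :=
  uniq_dot a pre b _ (by rw [← hcs, he, hpat]) ha hp

-- the split('.') scanning loop, restated structurally
def splitDot : List Char → List Char → List (List Char)
  | [], cur => [cur.reverse]
  | c :: rest, cur => if c = '.' then cur.reverse :: splitDot rest [] else splitDot rest (c :: cur)

lemma go_eq_splitDot : ∀ (l : List Char) (fuel : Nat) (cur : List Char) (acc : List (List Char)),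
    l.length < fuel →
    PySem.Chars.splitOn.go ['.'] fuel l cur acc = acc.reverse ++ splitDot l cur := by
  intro l
  induction l with
  | nil =>
    intro fuel cur acc hf
    cases fuel with
    | zero => omega
    | succ f => simp [PySem.Chars.splitOn.go, splitDot]
  | cons c rest ih =>
    intro fuel cur acc hf
    cases fuel with
    | zero => simp at hf
    | succ f =>
      by_cases hc : c = '.'
      · have hpre : List.isPrefixOf ['.'] (c :: rest) = true := by
          simp [List.isPrefixOf, hc]
        simp only [PySem.Chars.splitOn.go, hpre, if_true]
        rw [show List.drop (List.length ['.']) (c :: rest) = rest from rfl]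
        rw [ih f [] (cur.reverse :: acc) (by simpa using hf)]
        simp [splitDot, hc]
      · have hpre : List.isPrefixOf ['.'] (c :: rest) = false := by
          simp [List.isPrefixOf]
          exact fun h => absurd h.symm hc
        simp only [PySem.Chars.splitOn.go, hpre, Bool.false_eq_true, if_false]
        rw [ih f (c :: cur) acc (Nat.lt_of_succ_lt_succ hf)]
        simp [splitDot, hc]

lemma splitOn_eq (cs : List Char) : PySem.Chars.splitOn cs ['.'] = splitDot cs [] := by
  unfold PySem.Chars.splitOn
  rw [go_eq_splitDot cs (cs.length + 1) [] [] (by omega)]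
  rfl

lemma split_parts (host : String) :
    ∃ parts, PySem.Str.split? host "." = some parts ∧
      parts.map String.toList = splitDot host.toList [] := by
  have hb := PySem.Str.split?_map host "."
  rw [show (".".toList) = ['.'] from rfl] at hb
  rw [show PySem.Chars.split? host.toList ['.'] = some (PySem.Chars.splitOn host.toList ['.']) from rfl] at hb
  cases hs : PySem.Str.split? host "." with
  | none => rw [hs] at hb; simp at hb
  | some parts =>
    rw [hs] at hb
    simp only [Option.map_some, Option.some.injEq] at hb
    exact ⟨parts, rfl, by rw [hb, splitOn_eq]⟩

lemma splitDot_nodot : ∀ (l cur : List Char), '.' ∉ l → splitDot l cur = [cur.reverse ++ l] := by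
  intro l
  induction l with
  | nil => intro cur _; simp [splitDot]
  | cons c rest ih =>
    intro cur h
    have hc : ¬ c = '.' := fun h0 => h (h0 ▸ List.mem_cons_self)
    rw [splitDot, if_neg hc, ih (c :: cur) (fun hm => h (List.mem_cons_of_mem _ hm))]
    simp

lemma splitDot_split : ∀ (a b cur : List Char), '.' ∉ a →
    splitDot (a ++ '.' :: b) cur = (cur.reverse ++ a) :: splitDot b [] := by
  intro a
  induction a with
  | nil => intro b cur _; simp [splitDot]
  | cons c t ih =>
    intro b cur h
    have hc : ¬ c = '.' := fun h0 => h (h0 ▸ List.mem_cons_self)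
    rw [List.cons_append, splitDot, if_neg hc, ih b (c :: cur) (fun hm => h (List.mem_cons_of_mem _ hm))]
    simp

lemma splitDot_ne_nil : ∀ (l cur : List Char), splitDot l cur ≠ [] := by
  intro l
  induction l with
  | nil => intro cur; simp [splitDot]
  | cons c rest ih =>
    intro cur
    by_cases hc : c = '.'
    · rw [splitDot, if_pos hc]; simp
    · rw [splitDot, if_neg hc]; exact ih (c :: cur)

lemma splitDot_len2 {b : List Char} (cur : List Char) (h : '.' ∈ b) :
    2 ≤ (splitDot b cur).length := by
  obtain ⟨x, y, hxy, hx⟩ := first_dot h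
  rw [hxy, splitDot_split x y cur hx]
  cases hz : splitDot y [] with
  | nil => exact absurd hz (splitDot_ne_nil y [])
  | cons z zs => simp

-- A's loop when no pattern ever matches
lemma loopA_none {host : String} : ∀ {l : List Int},
    (∀ m ∈ l, host ≠ PySem.Int.toStr m ∧ host ≠ "2." ++ PySem.Int.toStr m ∧
      host ≠ "3." ++ PySem.Int.toStr m ∧ host ≠ "52." ++ PySem.Int.toStr m ∧
      host ≠ "1." ++ PySem.Int.toStr m) →
    matchLoopA host l = host := by
  intro l
  induction l with
  | nil => intro _; rfl
  | cons num rest ih =>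
    intro h
    obtain ⟨h1, h2, h3, h4, h5⟩ := h num List.mem_cons_self
    rw [matchLoopA, if_neg (by simp [h1]), if_neg (by simp [h2, h3]),
      if_neg (by simp [h4]), if_neg (by simp [h5])]
    exact ih (fun m hm => h m (List.mem_cons_of_mem _ hm))

-- A's loop when host is a bare octet string (dot-free)
lemma loopA_bare {host : String} (hd : '.' ∉ host.toList) : ∀ {l : List Int},
    (∃ m ∈ l, host = PySem.Int.toStr m) →
    matchLoopA host l = "172.26.3." ++ host := by
  intro l
  induction l with
  | nil => rintro ⟨m, hm, _⟩; cases hm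
  | cons num rest ih =>
    rintro ⟨m, hm, he⟩
    by_cases h1 : host = PySem.Int.toStr num
    · rw [matchLoopA, if_pos (by simp [h1])]
    · have h2 : host ≠ "2." ++ PySem.Int.toStr num := fun h0 => hd (h0 ▸ dot_in_p2 num)
      have h3 : host ≠ "3." ++ PySem.Int.toStr num := fun h0 => hd (h0 ▸ dot_in_p3 num)
      have h4 : host ≠ "52." ++ PySem.Int.toStr num := fun h0 => hd (h0 ▸ dot_in_p52 num)
      have h5 : host ≠ "1." ++ PySem.Int.toStr num := fun h0 => hd (h0 ▸ dot_in_p1 num)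
      rw [matchLoopA, if_neg (by simp [h1]), if_neg (by simp [h2, h3]),
        if_neg (by simp [h4]), if_neg (by simp [h5])]
      refine ih ⟨m, ?_, he⟩
      cases List.mem_cons.mp hm with
      | inl h0 => exact absurd (h0 ▸ he) h1
      | inr h0 => exact h0

-- first character of host, from a dotted-pattern equation (for branch discrimination)
lemma head_of_pat {host s : String} {c : Char} {t : List Char}
    (hpat : s.toList = c :: t) (he : host = s) : host.toList = c :: t := by
  rw [he, hpat]

-- A's loop when host = '2.<n>' or '3.<n>' for n in range(256)
lemma loopA_23 {host : String} {n : Int}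
    (hform : host = "2." ++ PySem.Int.toStr n ∨ host = "3." ++ PySem.Int.toStr n) :
    ∀ {l : List Int}, n ∈ l → (∀ m ∈ l, m ∈ PySem.List.pyRange 0 256 1) →
    matchLoopA host l = "172.26." ++ host := by
  have hdot : '.' ∈ host.toList := by
    cases hform with
    | inl he => exact he ▸ dot_in_p2 n
    | inr he => exact he ▸ dot_in_p3 n
  have hhead : host.toList.head? = some '2' ∨ host.toList.head? = some '3' := by
    cases hform with
    | inl he => left; rw [head_of_pat (toList_p2 n) he]; rfl
    | inr he => right; rw [head_of_pat (toList_p3 n) he]; rfl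
  intro l
  induction l with
  | nil => intro hn _; cases hn
  | cons num rest ih =>
    intro hn hr
    have h1 : host ≠ PySem.Int.toStr num :=
      fun h0 => toStr_dotfree (hr num List.mem_cons_self) (h0 ▸ hdot)
    by_cases hb2 : host = "2." ++ PySem.Int.toStr num ∨ host = "3." ++ PySem.Int.toStr num
    · rw [matchLoopA, if_neg (by simp [h1]), if_pos (by
        cases hb2 with
        | inl h0 => simp [h0]
        | inr h0 => simp [h0])]
    · have h4 : host ≠ "52." ++ PySem.Int.toStr num := by
        intro h0
        have := head_of_pat (toList_p52 num) h0
        rcases hhead with hh | hh <;> rw [this] at hh <;> simp at hh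
      have h5 : host ≠ "1." ++ PySem.Int.toStr num := by
        intro h0
        have := head_of_pat (toList_p1 num) h0
        rcases hhead with hh | hh <;> rw [this] at hh <;> simp at hh
      have h23 : ¬ (host == "2." ++ PySem.Int.toStr num || host == "3." ++ PySem.Int.toStr num) = true := by
        simp only [Bool.or_eq_true, beq_iff_eq]
        exact hb2
      rw [matchLoopA, if_neg (by simp [h1]), if_neg h23, if_neg (by simp [h4]),
        if_neg (by simp [h5])]
      refine ih ?_ (fun m hm => hr m (List.mem_cons_of_mem _ hm))
      cases List.mem_cons.mp hn with
      | inl h0 => exact absurd (h0 ▸ hform) hb2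
      | inr h0 => exact h0

-- A's loop when host = '52.<n>' for n in range(256)
lemma loopA_52 {host : String} {n : Int}
    (hform : host = "52." ++ PySem.Int.toStr n) :
    ∀ {l : List Int}, n ∈ l → (∀ m ∈ l, m ∈ PySem.List.pyRange 0 256 1) →
    matchLoopA host l = "172.25." ++ host := by
  have hdot : '.' ∈ host.toList := hform ▸ dot_in_p52 n
  have hhead : host.toList.head? = some '5' := by
    rw [head_of_pat (toList_p52 n) hform]; rfl
  intro l
  induction l with
  | nil => intro hn _; cases hn
  | cons num rest ih =>
    intro hn hr
    have h1 : host ≠ PySem.Int.toStr num :=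
      fun h0 => toStr_dotfree (hr num List.mem_cons_self) (h0 ▸ hdot)
    have h2 : host ≠ "2." ++ PySem.Int.toStr num := by
      intro h0; have := head_of_pat (toList_p2 num) h0; rw [this] at hhead; simp at hhead
    have h3 : host ≠ "3." ++ PySem.Int.toStr num := by
      intro h0; have := head_of_pat (toList_p3 num) h0; rw [this] at hhead; simp at hhead
    by_cases h4 : host = "52." ++ PySem.Int.toStr num
    · rw [matchLoopA, if_neg (by simp [h1]), if_neg (by simp [h2, h3]), if_pos (by simp [h4])]
    · have h5 : host ≠ "1." ++ PySem.Int.toStr num := by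
        intro h0; have := head_of_pat (toList_p1 num) h0; rw [this] at hhead; simp at hhead
      rw [matchLoopA, if_neg (by simp [h1]), if_neg (by simp [h2, h3]),
        if_neg (by simp [h4]), if_neg (by simp [h5])]
      refine ih ?_ (fun m hm => hr m (List.mem_cons_of_mem _ hm))
      cases List.mem_cons.mp hn with
      | inl h0 => exact absurd (h0 ▸ hform) h4
      | inr h0 => exact h0

-- A's loop when host = '1.<n>' for n in range(256)
lemma loopA_1 {host : String} {n : Int}
    (hform : host = "1." ++ PySem.Int.toStr n) :
    ∀ {l : List Int}, n ∈ l → (∀ m ∈ l, m ∈ PySem.List.pyRange 0 256 1) →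
    matchLoopA host l = "192.168." ++ host := by
  have hdot : '.' ∈ host.toList := hform ▸ dot_in_p1 n
  have hhead : host.toList.head? = some '1' := by
    rw [head_of_pat (toList_p1 n) hform]; rfl
  intro l
  induction l with
  | nil => intro hn _; cases hn
  | cons num rest ih =>
    intro hn hr
    have h1 : host ≠ PySem.Int.toStr num :=
      fun h0 => toStr_dotfree (hr num List.mem_cons_self) (h0 ▸ hdot)
    have h2 : host ≠ "2." ++ PySem.Int.toStr num := by
      intro h0; have := head_of_pat (toList_p2 num) h0; rw [this] at hhead; simp at hhead
    have h3 : host ≠ "3." ++ PySem.Int.toStr num := by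
      intro h0; have := head_of_pat (toList_p3 num) h0; rw [this] at hhead; simp at hhead
    have h4 : host ≠ "52." ++ PySem.Int.toStr num := by
      intro h0; have := head_of_pat (toList_p52 num) h0; rw [this] at hhead; simp at hhead
    by_cases h5 : host = "1." ++ PySem.Int.toStr num
    · rw [matchLoopA, if_neg (by simp [h1]), if_neg (by simp [h2, h3]),
        if_neg (by simp [h4]), if_pos (by simp [h5])]
    · rw [matchLoopA, if_neg (by simp [h1]), if_neg (by simp [h2, h3]),
        if_neg (by simp [h4]), if_neg (by simp [h5])]
      refine ih ?_ (fun m hm => hr m (List.mem_cons_of_mem _ hm))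
      cases List.mem_cons.mp hn with
      | inl h0 => exact absurd (h0 ▸ hform) h5
      | inr h0 => exact h0

lemma main_eq (host : String) : match_short_host_py host = match_short_host_py_alt host := by
  obtain ⟨parts, hsp, hmap⟩ := split_parts host
  have hrange : ∀ m ∈ PySem.List.pyRange 0 256 1, m ∈ PySem.List.pyRange 0 256 1 := fun m hm => hm
  by_cases hd : '.' ∈ host.toList
  · obtain ⟨a, b, hcs, ha⟩ := first_dot hd
    rw [hcs, splitDot_split a b [] ha] at hmap
    simp only [List.reverse_nil, List.nil_append] at hmap
    by_cases hdb : '.' ∈ b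
    · -- three or more pieces: B returns host, no pattern of A can match
      have hlen : 2 ≤ (splitDot b []).length := splitDot_len2 [] hdb
      have hA : match_short_host_py host = host := by
        apply loopA_none
        intro m hm
        refine ⟨fun h0 => toStr_dotfree hm (h0 ▸ hd), ?_, ?_, ?_, ?_⟩ <;>
          · intro h0
            first
            | exact toChars_dotfree hm ((decomp_pat hcs ha (by decide) (toList_p2 m) h0).2 ▸ hdb)
            | exact toChars_dotfree hm ((decomp_pat hcs ha (by decide) (toList_p3 m) h0).2 ▸ hdb)
            | exact toChars_dotfree hm ((decomp_pat hcs ha (by decide) (toList_p52 m) h0).2 ▸ hdb)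
            | exact toChars_dotfree hm ((decomp_pat hcs ha (by decide) (toList_p1 m) h0).2 ▸ hdb)
      rw [hA]
      unfold match_short_host_py_alt
      rw [hsp]
      match parts, hmap with
      | p :: q :: r :: t, _ => rfl
      | [p], hmap => have hl := congrArg List.length hmap; simp only [List.length_map, List.length_cons, List.length_nil] at hl; omega
      | [p, q], hmap => have hl := congrArg List.length hmap; simp only [List.length_map, List.length_cons, List.length_nil] at hl; omega
      | [], hmap => simp at hmap
    · -- exactly two pieces [a, b]
      rw [splitDot_nodot b [] hdb] at hmap
      simp only [List.reverse_nil, List.nil_append] at hmap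
      match parts, hmap with
      | [p, q], hmap =>
        simp only [List.map_cons, List.map_nil, List.cons.injEq, and_true] at hmap
        obtain ⟨hpa, hqb⟩ := hmap
        unfold match_short_host_py_alt
        rw [hsp]
        by_cases hq : pyOctet q = true
        · obtain ⟨m, hm, hqe⟩ := pyOctet_exists hq
          have hbm : b = PySem.Int.toChars m := by
            rw [← hqb, hqe, PySem.Int.toList_toStr]
          by_cases hp2 : p = "2"
          · have he : host = "2." ++ PySem.Int.toStr m := by
              apply String.toList_inj.mp
              rw [hcs, toList_p2, ← hbm]
              have : a = ['2'] := by rw [← hpa, hp2]; rfl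
              rw [this]
            rw [show match_short_host_py host = "172.26." ++ host from
              loopA_23 (Or.inl he) hm hrange]
            simp [hq, hp2]
          · by_cases hp3 : p = "3"
            · have he : host = "3." ++ PySem.Int.toStr m := by
                apply String.toList_inj.mp
                rw [hcs, toList_p3, ← hbm]
                have : a = ['3'] := by rw [← hpa, hp3]; rfl
                rw [this]
              rw [show match_short_host_py host = "172.26." ++ host from
                loopA_23 (Or.inr he) hm hrange]
              simp [hq, hp3]
            · by_cases hp52 : p = "52"
              · have he : host = "52." ++ PySem.Int.toStr m := by
                  apply String.toList_inj.mp
                  rw [hcs, toList_p52, ← hbm]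
                  have : a = ['5','2'] := by rw [← hpa, hp52]; rfl
                  rw [this]
                rw [show match_short_host_py host = "172.25." ++ host from
                  loopA_52 he hm hrange]
                simp [hq, hp52]
              · by_cases hp1 : p = "1"
                · have he : host = "1." ++ PySem.Int.toStr m := by
                    apply String.toList_inj.mp
                    rw [hcs, toList_p1, ← hbm]
                    have : a = ['1'] := by rw [← hpa, hp1]; rfl
                    rw [this]
                  rw [show match_short_host_py host = "192.168." ++ host from
                    loopA_1 he hm hrange]
                  simp [hq, hp1]
                · -- prefix not in the table: both return host
                  have hA : match_short_host_py host = host := by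
                    apply loopA_none
                    intro k hk
                    refine ⟨fun h0 => toStr_dotfree hk (h0 ▸ hd), ?_, ?_, ?_, ?_⟩
                    · intro h0
                      exact hp2 (String.toList_inj.mp (by
                        rw [hpa, (decomp_pat hcs ha (by decide) (toList_p2 k) h0).1]; rfl))
                    · intro h0
                      exact hp3 (String.toList_inj.mp (by
                        rw [hpa, (decomp_pat hcs ha (by decide) (toList_p3 k) h0).1]; rfl))
                    · intro h0
                      exact hp52 (String.toList_inj.mp (by
                        rw [hpa, (decomp_pat hcs ha (by decide) (toList_p52 k) h0).1]; rfl))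
                    · intro h0
                      exact hp1 (String.toList_inj.mp (by
                        rw [hpa, (decomp_pat hcs ha (by decide) (toList_p1 k) h0).1]; rfl))
                  rw [hA]
                  simp [hq, hp2, hp3, hp52, hp1]
        · -- second piece is not an octet: both return host
          have hA : match_short_host_py host = host := by
            apply loopA_none
            intro k hk
            refine ⟨fun h0 => toStr_dotfree hk (h0 ▸ hd), ?_, ?_, ?_, ?_⟩ <;>
              · intro h0
                apply hq
                first
                | rw [show q = PySem.Int.toStr k from String.toList_inj.mp (by
                      rw [hqb, (decomp_pat hcs ha (by decide) (toList_p2 k) h0).2,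
                        PySem.Int.toList_toStr])]
                  exact toStr_octet hk
                | rw [show q = PySem.Int.toStr k from String.toList_inj.mp (by
                      rw [hqb, (decomp_pat hcs ha (by decide) (toList_p3 k) h0).2,
                        PySem.Int.toList_toStr])]
                  exact toStr_octet hk
                | rw [show q = PySem.Int.toStr k from String.toList_inj.mp (by
                      rw [hqb, (decomp_pat hcs ha (by decide) (toList_p52 k) h0).2,
                        PySem.Int.toList_toStr])]
                  exact toStr_octet hk
                | rw [show q = PySem.Int.toStr k from String.toList_inj.mp (by
                      rw [hqb, (decomp_pat hcs ha (by decide) (toList_p1 k) h0).2,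
                        PySem.Int.toList_toStr])]
                  exact toStr_octet hk
          rw [hA]
          simp [hq]
      | [], hmap => simp at hmap
      | [p], hmap => simp at hmap
      | p :: q :: r :: t, hmap => simp at hmap
  · -- no dot in host: one piece [host]
    rw [splitDot_nodot host.toList [] hd] at hmap
    simp only [List.reverse_nil, List.nil_append] at hmap
    match parts, hmap with
    | [p], hmap =>
      simp only [List.map_cons, List.map_nil, List.cons.injEq, and_true] at hmap
      have hp : p = host := String.toList_inj.mp hmap
      unfold match_short_host_py_alt
      rw [hsp, hp]
      by_cases hq : pyOctet host = true
      · obtain ⟨m, hm, he⟩ := pyOctet_exists hq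
        rw [show match_short_host_py host = "172.26.3." ++ host from
          loopA_bare hd ⟨m, hm, he⟩]
        simp [hq]
      · have hA : match_short_host_py host = host := by
          apply loopA_none
          intro k hk
          refine ⟨?_, fun h0 => hd (h0 ▸ dot_in_p2 k), fun h0 => hd (h0 ▸ dot_in_p3 k),
            fun h0 => hd (h0 ▸ dot_in_p52 k), fun h0 => hd (h0 ▸ dot_in_p1 k)⟩
          intro h0
          exact hq (h0 ▸ toStr_octet hk)
        rw [hA]
        simp [hq]
    | [], hmap => simp at hmap
    | p :: q :: t, hmap =>
      simp only [List.map_cons, List.cons.injEq] at hmap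
      exact absurd hmap.2 (by simp)

-- ===== VERDICT (by name: the statement is the Claim_ definition above) =====
theorem match_short_host_py_spec : Claim_equal_match_short_host_py := by
  intro host _
  exact main_eq host
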